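-- pv_equiv track=rewrite | github.com/packetloss404/jarvis | legacy/tests/test_chat_command.py | _is_chat_command
-- ===== SOURCE A (Python) =====
-- def _is_chat_command(text: str) -> bool:
--     """Detect chat/livechat voice commands. Exact replica of main.py logic.
--
--     WARNING: This is a manual replica of the closure inside main.py:main().
--     If you change the phrase list here, you MUST also change it in main.py
--     (and vice versa). Search for '_is_chat_command' in main.py.
--     """
--     normalized = text.lower().strip().rstrip(".")
--     chat_phrases = [
--         "open chat",
--         "launch chat",
--         "start chat",
--         "livechat",
--         "live chat",
--         "open livechat",
--         "open live chat",
--         "launch livechat",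
--         "launch live chat",
--         "start livechat",
--         "start live chat",
--     ]
--     return any(
--         phrase == normalized or normalized.startswith(phrase) for phrase in chat_phrases
--     )
-- ===== SOURCE B (Python) =====
-- def _is_chat_command(text: str) -> bool:
--     """Detect chat/livechat voice commands (verb x object decomposition)."""
--     normalized = text.lower().strip().rstrip(".")
--     if normalized.startswith("livechat") or normalized.startswith("live chat"):
--         return True
--     for verb in ("open ", "launch ", "start "):
--         if normalized.startswith(verb):
--             rest = normalized[len(verb):]
--             return (
--                 rest.startswith("chat")
--                 or rest.startswith("livechat")
--                 or rest.startswith("live chat")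
--             )
--     return False
-- ===== Notes on version B (the rewrite author's own statement) =====
-- stated objective: simpler
-- what changed: Replaces the scan over an 11-entry flat phrase list with a verb-by-object decomposition: the two bare livechat spellings are checked directly, then the single matching action verb is stripped once and the remainder is tested against the three object spellings.
import Mathlib
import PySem

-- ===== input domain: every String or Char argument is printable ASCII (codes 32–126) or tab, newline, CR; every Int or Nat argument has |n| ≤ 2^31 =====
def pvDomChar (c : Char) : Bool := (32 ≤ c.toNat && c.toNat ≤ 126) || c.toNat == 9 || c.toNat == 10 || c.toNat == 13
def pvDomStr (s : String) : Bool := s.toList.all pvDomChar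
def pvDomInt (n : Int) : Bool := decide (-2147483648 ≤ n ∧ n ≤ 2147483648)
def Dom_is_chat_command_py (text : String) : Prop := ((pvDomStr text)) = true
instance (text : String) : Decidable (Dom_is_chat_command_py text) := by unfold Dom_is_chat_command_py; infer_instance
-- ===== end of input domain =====

-- B replaces A's scan over an 11-entry flat phrase list by a verb×object decomposition
-- (check bare "livechat"/"live chat", else strip the single matching action verb and
-- test the remainder against the three objects); objective: simpler.


-- s.rstrip(".") ported by hand (exact: Python removes the trailing run of '.' characters)
def pvRstripDot (cs : List Char) : List Char := (cs.reverse.dropWhile (· == '.')).reverse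

-- ===== PORT A =====
def pvChatPhrases : List (List Char) :=
  ["open chat".toList, "launch chat".toList, "start chat".toList, "livechat".toList,
   "live chat".toList, "open livechat".toList, "open live chat".toList,
   "launch livechat".toList, "launch live chat".toList, "start livechat".toList,
   "start live chat".toList]

def is_chat_command_py (text : String) : Bool :=
  let normalized := pvRstripDot (PySem.Chars.strip (PySem.Chars.lower text.toList))
  pvChatPhrases.any (fun phrase => phrase == normalized || PySem.Chars.startswith normalized phrase)

-- ===== PORT B =====
def pvAltVerbLoop (normalized : List Char) : List (List Char) → Bool
  | [] => false
  | verb :: verbs =>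
    if PySem.Chars.startswith normalized verb then
      -- rest = normalized[len(verb):]
      let rest := PySem.Chars.slice normalized (some (verb.length : Int)) none
      PySem.Chars.startswith rest "chat".toList || PySem.Chars.startswith rest "livechat".toList
        || PySem.Chars.startswith rest "live chat".toList
    else pvAltVerbLoop normalized verbs

def is_chat_command_py_alt (text : String) : Bool :=
  let normalized := pvRstripDot (PySem.Chars.strip (PySem.Chars.lower text.toList))
  if PySem.Chars.startswith normalized "livechat".toList
      || PySem.Chars.startswith normalized "live chat".toList then true
  else pvAltVerbLoop normalized ["open ".toList, "launch ".toList, "start ".toList]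

-- ===== PRECONDITION & SPEC =====
def Spec_is_chat_command_py (text : String) (out : Bool) : Prop := out = is_chat_command_py_alt text
instance (text : String) (out : Bool) : Decidable (Spec_is_chat_command_py text out) := by unfold Spec_is_chat_command_py; infer_instance

-- ===== CLAIM (what is proved, stated in full; the proofs are below) =====
def Claim_equal_is_chat_command_py : Prop := ∀ (text : String), Dom_is_chat_command_py text → Spec_is_chat_command_py text (is_chat_command_py text)

-- ===== LEMMAS AND PROOFS =====

theorem pvPrefix_append_iff (a b l : List Char) :
    (a ++ b) <+: l ↔ a <+: l ∧ b <+: l.drop a.length := by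
  constructor
  · rintro ⟨t, rfl⟩
    exact ⟨⟨b ++ t, by simp⟩, ⟨t, by simp⟩⟩
  · rintro ⟨⟨t1, rfl⟩, h2⟩
    simp at h2
    obtain ⟨t2, ht⟩ := h2
    exact ⟨t2, by rw [List.append_assoc, ht]⟩

theorem pvStartswith_append (l a b : List Char) :
    PySem.Chars.startswith l (a ++ b)
      = (PySem.Chars.startswith l a && PySem.Chars.startswith (l.drop a.length) b) := by
  rw [Bool.eq_iff_iff]
  simp only [Bool.and_eq_true, PySem.Chars.startswith_iff]
  exact pvPrefix_append_iff a b l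

theorem pvSw_split (l a b c : List Char) (hc : c = a ++ b) :
    PySem.Chars.startswith l c
      = (PySem.Chars.startswith l a && PySem.Chars.startswith (l.drop a.length) b) := by
  subst hc; exact pvStartswith_append l a b

theorem pvPrefixExcl {a b : List Char} (l : List Char)
    (hab : ¬ a <+: b) (hba : ¬ b <+: a) (h : a <+: l) : ¬ b <+: l := by
  intro hb
  rcases List.prefix_or_prefix_of_prefix h hb with h' | h'
  · exact hab h'
  · exact hba h'

theorem pvSwTrue {p l : List Char} (h : p <+: l) :
    PySem.Chars.startswith l p = true := (PySem.Chars.startswith_iff _ _).mpr h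

theorem pvSwFalse {p l : List Char} (h : ¬ p <+: l) :
    PySem.Chars.startswith l p = false := by
  cases hb : PySem.Chars.startswith l p
  · rfl
  · exact absurd ((PySem.Chars.startswith_iff _ _).mp hb) h

theorem pvChat_eq (l : List Char) :
    (pvChatPhrases.any fun p => (p == l || PySem.Chars.startswith l p))
      = (if PySem.Chars.startswith l "livechat".toList
            || PySem.Chars.startswith l "live chat".toList then true
         else pvAltVerbLoop l ["open ".toList, "launch ".toList, "start ".toList]) := by
  have hred : ∀ p : List Char,
      (p == l || PySem.Chars.startswith l p) = PySem.Chars.startswith l p := by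
    intro p
    by_cases hp : p = l
    · subst hp
      simp [pvSwTrue List.prefix_rfl]
    · simp [hp]
  simp only [pvChatPhrases, String.reduceToList, List.any_cons, List.any_nil, hred, Bool.or_false]
  by_cases h1 : ['l', 'i', 'v', 'e', 'c', 'h', 'a', 't'] <+: l
  · simp [pvSwTrue h1]
  · have e1 := pvSwFalse h1
    by_cases h2 : ['l', 'i', 'v', 'e', ' ', 'c', 'h', 'a', 't'] <+: l
    · simp [pvSwTrue h2, e1]
    · have e2 := pvSwFalse h2
      rw [pvSw_split l ['o', 'p', 'e', 'n', ' '] ['c', 'h', 'a', 't']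
        ['o', 'p', 'e', 'n', ' ', 'c', 'h', 'a', 't'] (by decide),
      pvSw_split l ['o', 'p', 'e', 'n', ' '] ['l', 'i', 'v', 'e', 'c', 'h', 'a', 't']
        ['o', 'p', 'e', 'n', ' ', 'l', 'i', 'v', 'e', 'c', 'h', 'a', 't'] (by decide),
      pvSw_split l ['o', 'p', 'e', 'n', ' '] ['l', 'i', 'v', 'e', ' ', 'c', 'h', 'a', 't']
        ['o', 'p', 'e', 'n', ' ', 'l', 'i', 'v', 'e', ' ', 'c', 'h', 'a', 't'] (by decide),
      pvSw_split l ['l', 'a', 'u', 'n', 'c', 'h', ' '] ['c', 'h', 'a', 't']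
        ['l', 'a', 'u', 'n', 'c', 'h', ' ', 'c', 'h', 'a', 't'] (by decide),
      pvSw_split l ['l', 'a', 'u', 'n', 'c', 'h', ' '] ['l', 'i', 'v', 'e', 'c', 'h', 'a', 't']
        ['l', 'a', 'u', 'n', 'c', 'h', ' ', 'l', 'i', 'v', 'e', 'c', 'h', 'a', 't'] (by decide),
      pvSw_split l ['l', 'a', 'u', 'n', 'c', 'h', ' '] ['l', 'i', 'v', 'e', ' ', 'c', 'h', 'a', 't']
        ['l', 'a', 'u', 'n', 'c', 'h', ' ', 'l', 'i', 'v', 'e', ' ', 'c', 'h', 'a', 't'] (by decide),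
      pvSw_split l ['s', 't', 'a', 'r', 't', ' '] ['c', 'h', 'a', 't']
        ['s', 't', 'a', 'r', 't', ' ', 'c', 'h', 'a', 't'] (by decide),
      pvSw_split l ['s', 't', 'a', 'r', 't', ' '] ['l', 'i', 'v', 'e', 'c', 'h', 'a', 't']
        ['s', 't', 'a', 'r', 't', ' ', 'l', 'i', 'v', 'e', 'c', 'h', 'a', 't'] (by decide),
      pvSw_split l ['s', 't', 'a', 'r', 't', ' '] ['l', 'i', 'v', 'e', ' ', 'c', 'h', 'a', 't']
        ['s', 't', 'a', 'r', 't', ' ', 'l', 'i', 'v', 'e', ' ', 'c', 'h', 'a', 't'] (by decide)]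
      by_cases ho : ['o', 'p', 'e', 'n', ' '] <+: l
      · have ela := pvSwFalse (pvPrefixExcl l (by decide) (by decide) ho
          (b := ['l', 'a', 'u', 'n', 'c', 'h', ' ']))
        have est := pvSwFalse (pvPrefixExcl l (by decide) (by decide) ho
          (b := ['s', 't', 'a', 'r', 't', ' ']))
        have eo := pvSwTrue ho
        simp only [pvAltVerbLoop, eo, ela, est, e1, e2, Bool.false_and, Bool.true_and,
          Bool.or_false, Bool.false_or, Bool.or_assoc, String.reduceToList, Bool.false_eq_true, if_true,
          ite_false, PySem.Chars.slice_eq_listSlice, PySem.List.slice_from_natCast]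
      · have eo := pvSwFalse ho
        by_cases hla : ['l', 'a', 'u', 'n', 'c', 'h', ' '] <+: l
        · have est := pvSwFalse (pvPrefixExcl l (by decide) (by decide) hla
            (b := ['s', 't', 'a', 'r', 't', ' ']))
          have ela := pvSwTrue hla
          simp only [pvAltVerbLoop, eo, ela, est, e1, e2, Bool.false_and, Bool.true_and,
            Bool.or_false, Bool.false_or, Bool.or_assoc, String.reduceToList, Bool.false_eq_true, if_true,
            ite_false, PySem.Chars.slice_eq_listSlice, PySem.List.slice_from_natCast]
        · have ela := pvSwFalse hla
          by_cases hst : ['s', 't', 'a', 'r', 't', ' '] <+: l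
          · have est := pvSwTrue hst
            simp only [pvAltVerbLoop, eo, ela, est, e1, e2, Bool.false_and, Bool.true_and,
              Bool.or_false, Bool.false_or, Bool.or_assoc, String.reduceToList, Bool.false_eq_true, if_true,
              ite_false, PySem.Chars.slice_eq_listSlice, PySem.List.slice_from_natCast]
          · have est := pvSwFalse hst
            simp only [pvAltVerbLoop, eo, ela, est, e1, e2, Bool.false_and, Bool.or_self,
              Bool.false_eq_true, ite_false]

-- ===== VERDICT (by name: the statement is the Claim_ definition above) =====
theorem is_chat_command_py_spec : Claim_equal_is_chat_command_py := by
  intro text _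
  unfold Spec_is_chat_command_py is_chat_command_py is_chat_command_py_alt
  exact pvChat_eq _
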